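-- pv_equiv track=rewrite | github.com/grapheneaffiliate/h4-polytopic-attention | solve_arc_b24.py | solve_f25fbde4
-- ===== SOURCE A (Python) =====
-- def solve_f25fbde4(grid):
--     """Shape scaled 2x."""
--     R, C = len(grid), len(grid[0])
--     cells = [(r,c) for r in range(R) for c in range(C) if grid[r][c]!=0]
--     if not cells: return grid
--     min_r = min(r for r,c in cells)
--     max_r = max(r for r,c in cells)
--     min_c = min(c for r,c in cells)
--     max_c = max(c for r,c in cells)
--     h = max_r-min_r+1; w = max_c-min_c+1
--     out = [[0]*(w*2) for _ in range(h*2)]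
--     for r,c in cells:
--         v = grid[r][c]
--         rr = (r-min_r)*2; cc = (c-min_c)*2
--         out[rr][cc]=out[rr][cc+1]=out[rr+1][cc]=out[rr+1][cc+1]=v
--     return out
-- ===== SOURCE B (Python) =====
-- def solve_f25fbde4(grid):
--     """Shape scaled 2x."""
--     R, C = len(grid), len(grid[0])
--     nz_rows = [r for r in range(R) if any(grid[r][c] != 0 for c in range(C))]
--     if not nz_rows:
--         return grid
--     nz_cols = [c for c in range(C) if any(grid[r][c] != 0 for r in range(R))]
--     out = []
--     for r in range(nz_rows[0], nz_rows[-1] + 1):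
--         row = []
--         for c in range(nz_cols[0], nz_cols[-1] + 1):
--             row += [grid[r][c], grid[r][c]]
--         out.append(row)
--         out.append(list(row))
--     return out
-- ===== Notes on version B (the rewrite author's own statement) =====
-- stated objective: alternative
-- what changed: B never builds the list of nonzero cells nor scatter-writes 2x2 blocks into a pre-zeroed array; it finds the nonzero row/column index ranges by filtering, then builds the output directly row by row over the bounding rectangle, doubling each value and each row.
import Mathlib
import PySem

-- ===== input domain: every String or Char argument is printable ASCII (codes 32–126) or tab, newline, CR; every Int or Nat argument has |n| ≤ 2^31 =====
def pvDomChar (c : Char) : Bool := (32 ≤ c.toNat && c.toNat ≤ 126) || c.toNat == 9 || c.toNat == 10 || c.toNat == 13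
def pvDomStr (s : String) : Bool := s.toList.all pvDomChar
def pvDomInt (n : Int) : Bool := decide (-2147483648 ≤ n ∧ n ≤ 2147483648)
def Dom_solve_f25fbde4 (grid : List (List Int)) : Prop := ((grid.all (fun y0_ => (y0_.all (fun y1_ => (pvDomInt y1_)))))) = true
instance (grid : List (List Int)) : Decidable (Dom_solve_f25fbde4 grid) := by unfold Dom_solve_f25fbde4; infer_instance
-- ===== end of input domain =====

-- B re-implements the 2x upscale of the nonzero bounding box by building the output
-- rectangle row by row (doubling each value and each row) instead of A's scatter of
-- 2x2 blocks into a pre-zeroed array; equal return values proved on Pre_ (where A returns).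

-- ===== PORT A =====
-- grid[r][c] for in-range nonnegative indices (the only accesses Pre_ admits); exact there
def pvGet (grid : List (List Int)) (r c : Nat) : Int := (grid.getD r []).getD c 0

-- the comprehension [(r,c) for r in range(R) for c in range(C) if grid[r][c]!=0]
def pvCells (grid : List (List Int)) : List (Nat × Nat) :=
  (List.range grid.length).flatMap (fun r =>
    ((List.range (grid.headD []).length).filter (fun c => pvGet grid r c != 0)).map (fun c => (r, c)))

-- the loop body: out[rr][cc]=out[rr][cc+1]=out[rr+1][cc]=out[rr+1][cc+1]=v
def pvScatter (grid : List (List Int)) (minr minc : Nat) (out : List (List Int)) (rc : Nat × Nat) : List (List Int) :=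
  let v := pvGet grid rc.1 rc.2
  let rr := (rc.1 - minr) * 2
  let cc := (rc.2 - minc) * 2
  (out.modify rr (fun row => (row.set cc v).set (cc+1) v)).modify (rr+1) (fun row => (row.set cc v).set (cc+1) v)

def solve_f25fbde4 (grid : List (List Int)) : List (List Int) :=
  let cells := pvCells grid
  if cells.isEmpty then grid
  else
    -- min/max of a nonempty list; this branch guarantees nonemptiness, so .getD 0 never fires
    let minr := (PySem.List.min? (cells.map Prod.fst) (fun x => x)).getD 0
    let maxr := (PySem.List.max? (cells.map Prod.fst) (fun x => x)).getD 0
    let minc := (PySem.List.min? (cells.map Prod.snd) (fun x => x)).getD 0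
    let maxc := (PySem.List.max? (cells.map Prod.snd) (fun x => x)).getD 0
    let h := maxr - minr + 1
    let w := maxc - minc + 1
    let out0 := List.replicate (h*2) (List.replicate (w*2) (0:Int))
    cells.foldl (pvScatter grid minr minc) out0

-- ===== PORT B =====
def pvRowNZ (grid : List (List Int)) (r : Nat) : Bool :=
  (List.range (grid.headD []).length).any (fun c => pvGet grid r c != 0)

def pvColNZ (grid : List (List Int)) (c : Nat) : Bool :=
  (List.range grid.length).any (fun r => pvGet grid r c != 0)

def pvNzRows (grid : List (List Int)) : List Nat :=
  (List.range grid.length).filter (pvRowNZ grid)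

def pvNzCols (grid : List (List Int)) : List Nat :=
  (List.range (grid.headD []).length).filter (pvColNZ grid)

-- the inner loop: row += [grid[r][c], grid[r][c]]
def pvRow (grid : List (List Int)) (minc maxc r : Nat) : List Int :=
  (List.range' minc (maxc + 1 - minc)).foldl (fun row c => row ++ [pvGet grid r c, pvGet grid r c]) []

def solve_f25fbde4_alt (grid : List (List Int)) : List (List Int) :=
  let nzRows := pvNzRows grid
  if nzRows.isEmpty then grid
  else
    let nzCols := pvNzCols grid
    -- nz_rows[0], nz_rows[-1], nz_cols[0], nz_cols[-1]; nonempty here, so .getD 0 never fires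
    let minr := nzRows.head?.getD 0
    let maxr := nzRows.getLast?.getD 0
    let minc := nzCols.head?.getD 0
    let maxc := nzCols.getLast?.getD 0
    (List.range' minr (maxr + 1 - minr)).foldl
      (fun out r => out ++ [pvRow grid minc maxc r, pvRow grid minc maxc r]) []

-- ===== PRECONDITION & SPEC =====
-- Pre_ excludes exactly the inputs on which A raises IndexError: the empty grid
-- (grid[0]) and grids with a row shorter than the first row (grid[r][c], c < len(grid[0])).
def Pre_solve_f25fbde4 (grid : List (List Int)) : Prop :=
  grid ≠ [] ∧ ∀ row ∈ grid, (grid.headD []).length ≤ row.length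

instance (grid : List (List Int)) : Decidable (Pre_solve_f25fbde4 grid) := by
  unfold Pre_solve_f25fbde4; infer_instance

def pvWitness_solve_f25fbde4 : List (List Int) := [[0, 1], [2, 0]]

def Spec_solve_f25fbde4 (grid : List (List Int)) (out : List (List Int)) : Prop := out = solve_f25fbde4_alt grid
instance (grid : List (List Int)) (out : List (List Int)) : Decidable (Spec_solve_f25fbde4 grid out) := by unfold Spec_solve_f25fbde4; infer_instance

-- ===== CLAIM (what is proved, stated in full; the proofs are below) =====
def Claim_equal_solve_f25fbde4 : Prop := ∀ (grid : List (List Int)), Dom_solve_f25fbde4 grid → Pre_solve_f25fbde4 grid → Spec_solve_f25fbde4 grid (solve_f25fbde4 grid)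

-- ===== LEMMAS AND PROOFS =====

-- entry (i,j) of a matrix, 0 outside
def pvAt (m : List (List Int)) (i j : Nat) : Int := ((m[i]?.getD [])[j]?.getD 0)

theorem mem_pvCells (grid : List (List Int)) (r c : Nat) :
    (r, c) ∈ pvCells grid ↔
      r < grid.length ∧ c < (grid.headD []).length ∧ pvGet grid r c ≠ 0 := by
  simp only [pvCells, List.mem_flatMap, List.mem_map, List.mem_filter, List.mem_range,
    bne_iff_ne, ne_eq, Prod.mk.injEq]
  constructor
  · rintro ⟨a, ha, b, ⟨hb, hnz⟩, rfl, rfl⟩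
    exact ⟨ha, hb, hnz⟩
  · rintro ⟨h1, h2, h3⟩
    exact ⟨r, h1, c, ⟨h2, h3⟩, rfl, rfl⟩

theorem mem_fst (grid : List (List Int)) (r : Nat) :
    r ∈ (pvCells grid).map Prod.fst ↔ r < grid.length ∧ pvRowNZ grid r = true := by
  rw [List.mem_map]
  simp only [pvRowNZ, List.any_eq_true, List.mem_range, bne_iff_ne, ne_eq]
  constructor
  · rintro ⟨⟨a, b⟩, hm, rfl⟩
    rcases (mem_pvCells grid a b).1 hm with ⟨h1, h2, h3⟩
    exact ⟨h1, b, h2, h3⟩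
  · rintro ⟨h1, c, h2, h3⟩
    exact ⟨(r, c), (mem_pvCells grid r c).2 ⟨h1, h2, h3⟩, rfl⟩

theorem mem_snd (grid : List (List Int)) (c : Nat) :
    c ∈ (pvCells grid).map Prod.snd ↔ c < (grid.headD []).length ∧ pvColNZ grid c = true := by
  rw [List.mem_map]
  simp only [pvColNZ, List.any_eq_true, List.mem_range, bne_iff_ne, ne_eq]
  constructor
  · rintro ⟨⟨a, b⟩, hm, rfl⟩
    rcases (mem_pvCells grid a b).1 hm with ⟨h1, h2, h3⟩
    exact ⟨h2, a, h1, h3⟩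
  · rintro ⟨h1, rr, h2, h3⟩
    exact ⟨(rr, c), (mem_pvCells grid rr c).2 ⟨h2, h1, h3⟩, rfl⟩

theorem head_filter_least (p : Nat → Bool) :
    ∀ (n s a : Nat) (t : List Nat), (List.range' s n).filter p = a :: t →
      ∀ b ∈ List.range' s n, p b = true → a ≤ b := by
  intro n
  induction n with
  | zero => intro s a t h; simp at h
  | succ n ih =>
    intro s a t h b hb hpb
    rw [List.range'_succ] at h hb
    rw [List.filter_cons] at h
    rcases List.mem_cons.1 hb with rfl | hb'
    · rw [if_pos hpb] at h
      cases h
      exact Nat.le_refl _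
    · have hble := (List.mem_range'_1.1 hb').1
      by_cases hp : p s = true
      · rw [if_pos hp] at h
        cases h
        omega
      · rw [if_neg hp] at h
        exact ih (s+1) a t h b hb' hpb

theorem pv_getLast_getD_mem (l : List Nat) (h : l ≠ []) : l.getLast?.getD 0 ∈ l := by
  cases hl : l.getLast? with
  | none => exact absurd (List.getLast?_eq_none_iff.1 hl) h
  | some a => exact List.mem_of_getLast? hl

theorem pv_getLast_getD_indep (l : List Nat) (d : Nat) (h : l ≠ []) :
    l.getLast?.getD d = l.getLast?.getD 0 := by
  cases hl : l.getLast? with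
  | none => exact absurd (List.getLast?_eq_none_iff.1 hl) h
  | some a => rfl

theorem getLast_filter_greatest (p : Nat → Bool) :
    ∀ (n s b : Nat), b ∈ List.range' s n → p b = true →
      b ≤ ((List.range' s n).filter p).getLast?.getD 0 := by
  intro n
  induction n with
  | zero => intro s b hb; simp at hb
  | succ n ih =>
    intro s b hb hpb
    rw [List.range'_succ] at hb ⊢
    rw [List.filter_cons]
    rcases List.mem_cons.1 hb with rfl | hb'
    · rw [if_pos hpb, List.getLast?_cons]
      simp only [Option.getD_some]
      cases hfe : (List.range' (b+1) n).filter p with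
      | nil => simp
      | cons x xs =>
        have hne : (x :: xs : List Nat) ≠ [] := by simp
        have hmem : (x :: xs).getLast?.getD b ∈ (x :: xs) := by
          rw [pv_getLast_getD_indep _ _ hne]; exact pv_getLast_getD_mem _ hne
        have hmem' : (x :: xs).getLast?.getD b ∈ (List.range' (b+1) n).filter p := by
          rw [hfe]; exact hmem
        have := (List.mem_range'_1.1 (List.mem_filter.1 hmem').1).1
        omega
    · have hbf : b ∈ (List.range' (s+1) n).filter p := List.mem_filter.2 ⟨hb', hpb⟩
      have hfne : (List.range' (s+1) n).filter p ≠ [] := List.ne_nil_of_mem hbf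
      by_cases hp : p s = true
      · rw [if_pos hp, List.getLast?_cons]
        simp only [Option.getD_some]
        rw [pv_getLast_getD_indep _ _ hfne]
        exact ih (s+1) b hb' hpb
      · rw [if_neg hp]
        exact ih (s+1) b hb' hpb

-- shape of rows, index-wise
def pvRowsLen (m : List (List Int)) (W : Nat) : Prop :=
  ∀ (k : Nat) (row : List Int), m[k]? = some row → row.length = W

theorem pvScatter_length (grid : List (List Int)) (minr minc : Nat)
    (out : List (List Int)) (rc : Nat × Nat) :
    (pvScatter grid minr minc out rc).length = out.length := by
  simp [pvScatter]

theorem pvScatter_rowsLen (grid : List (List Int)) (minr minc W : Nat)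
    (out : List (List Int)) (rc : Nat × Nat) (hrows : pvRowsLen out W) :
    pvRowsLen (pvScatter grid minr minc out rc) W := by
  intro k row h
  simp only [pvScatter, List.getElem?_modify] at h
  cases ho : out[k]? with
  | none => rw [ho] at h; exact absurd h (by simp)
  | some row0 =>
    rw [ho] at h
    have hmapS : ∀ (f g : List Int → List Int) (x : List Int),
        (f <$> (g <$> some x)) = some (f (g x)) := fun _ _ _ => rfl
    simp only [hmapS, Option.some.injEq] at h
    have h0 := hrows k row0 ho
    split_ifs at h <;> simp [← h, h0]

theorem pvScatter_at (grid : List (List Int)) (minr minc W : Nat)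
    (out : List (List Int)) (rc : Nat × Nat) (i j : Nat)
    (hr : minr ≤ rc.1) (hc : minc ≤ rc.2)
    (hH : (rc.1 - minr) * 2 + 1 < out.length)
    (hW : (rc.2 - minc) * 2 + 1 < W)
    (hrows : pvRowsLen out W) :
    pvAt (pvScatter grid minr minc out rc) i j =
      if rc.1 = minr + i / 2 ∧ rc.2 = minc + j / 2 then pvGet grid rc.1 rc.2
      else pvAt out i j := by
  obtain ⟨a, b⟩ := rc
  simp only at hr hc hH hW
  have hmapN : ∀ (f g : List Int → List Int),
      ((f <$> (g <$> (none : Option (List Int)))).getD []) = [] := fun _ _ => rfl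
  have hmapS : ∀ (f g : List Int → List Int) (x : List Int),
      ((f <$> (g <$> some x)).getD []) = f (g x) := fun _ _ _ => rfl
  simp only [pvScatter, pvAt, List.getElem?_modify]
  cases ho : out[i]? with
  | none =>
    have hlen : out.length ≤ i := List.getElem?_eq_none_iff.1 ho
    simp only [hmapN, Option.getD_none]
    have hneg : ¬(a = minr + i / 2 ∧ b = minc + j / 2) := by rintro ⟨h1, _⟩; omega
    rw [if_neg hneg]
  | some row0 =>
    have hrl : row0.length = W := hrows i row0 ho
    simp only [hmapS, Option.getD_some]
    by_cases hi : (a - minr) * 2 = i ∨ (a - minr) * 2 + 1 = i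
    · have hval : (if (a - minr) * 2 + 1 = i then
          ((if (a - minr) * 2 = i then ((row0.set ((b - minc) * 2) (pvGet grid a b)).set ((b - minc) * 2 + 1) (pvGet grid a b)) else row0).set ((b - minc) * 2) (pvGet grid a b)).set ((b - minc) * 2 + 1) (pvGet grid a b)
        else (if (a - minr) * 2 = i then ((row0.set ((b - minc) * 2) (pvGet grid a b)).set ((b - minc) * 2 + 1) (pvGet grid a b)) else row0)) =
          (row0.set ((b - minc) * 2) (pvGet grid a b)).set ((b - minc) * 2 + 1) (pvGet grid a b) := by
        rcases hi with hi | hi <;> split_ifs <;> first | rfl | omega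
      rw [hval]
      rw [List.getElem?_set, List.getElem?_set]
      simp only [List.length_set, hrl]
      by_cases hj : j = (b - minc) * 2 ∨ j = (b - minc) * 2 + 1
      · have hcnd : a = minr + i / 2 ∧ b = minc + j / 2 := by constructor <;> omega
        rw [if_pos hcnd]
        rcases hj with rfl | rfl
        · rw [if_neg (by omega), if_pos rfl, if_pos (by omega), Option.getD_some]
        · rw [if_pos rfl, if_pos (by omega), Option.getD_some]
      · rw [if_neg (by rintro ⟨h1, h2⟩; omega)]
        rw [if_neg (by omega), if_neg (by omega)]
    · rw [if_neg (by omega : ¬((a - minr) * 2 + 1 = i)),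
         if_neg (by omega : ¬((a - minr) * 2 = i))]
      rw [if_neg (by rintro ⟨h1, _⟩; omega)]

theorem fold_scatter_length (grid : List (List Int)) (minr minc : Nat) :
    ∀ (L : List (Nat × Nat)) (out : List (List Int)),
      (L.foldl (pvScatter grid minr minc) out).length = out.length := by
  intro L
  induction L with
  | nil => intro out; rfl
  | cons rc L ih => intro out; rw [List.foldl_cons, ih, pvScatter_length]

theorem fold_scatter_rowsLen (grid : List (List Int)) (minr minc W : Nat) :
    ∀ (L : List (Nat × Nat)) (out : List (List Int)), pvRowsLen out W →
      pvRowsLen (L.foldl (pvScatter grid minr minc) out) W := by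
  intro L
  induction L with
  | nil => intro out h; exact h
  | cons rc L ih => intro out h; exact ih _ (pvScatter_rowsLen grid minr minc W out rc h)

theorem fold_scatter_at (grid : List (List Int)) (minr minc W : Nat) :
    ∀ (L : List (Nat × Nat)) (out : List (List Int)),
      (∀ p ∈ L, minr ≤ p.1 ∧ minc ≤ p.2 ∧
        (p.1 - minr) * 2 + 1 < out.length ∧ (p.2 - minc) * 2 + 1 < W) →
      pvRowsLen out W →
      ∀ (i j : Nat),
        pvAt (L.foldl (pvScatter grid minr minc) out) i j =
          if (minr + i / 2, minc + j / 2) ∈ L then pvGet grid (minr + i / 2) (minc + j / 2)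
          else pvAt out i j := by
  intro L
  induction L with
  | nil => intro out _ _ i j; simp
  | cons rc L ih =>
    intro out hcell hrows i j
    have hrc := hcell rc List.mem_cons_self
    rw [List.foldl_cons]
    have hstep := pvScatter_at grid minr minc W out rc i j hrc.1 hrc.2.1 hrc.2.2.1 hrc.2.2.2 hrows
    rw [ih (pvScatter grid minr minc out rc)
        (by intro p hp
            have := hcell p (List.mem_cons_of_mem _ hp)
            rwa [pvScatter_length])
        (pvScatter_rowsLen grid minr minc W out rc hrows) i j]
    by_cases hmem : (minr + i / 2, minc + j / 2) ∈ L
    · rw [if_pos hmem, if_pos (List.mem_cons_of_mem _ hmem)]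
    · rw [if_neg hmem, hstep]
      by_cases hrceq : rc.1 = minr + i / 2 ∧ rc.2 = minc + j / 2
      · rw [if_pos hrceq, if_pos]
        · rw [hrceq.1, hrceq.2]
        · exact List.mem_cons.2 (Or.inl (Prod.ext hrceq.1.symm hrceq.2.symm))
      · rw [if_neg hrceq, if_neg]
        rw [List.mem_cons]
        rintro (heq | hmem')
        · exact hrceq ⟨by rw [← heq], by rw [← heq]⟩
        · exact hmem hmem'

theorem pair_flatMap_length {α : Type} (g : Nat → α) :
    ∀ (n s : Nat), ((List.range' s n).flatMap (fun r => [g r, g r])).length = 2 * n := by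
  intro n
  induction n with
  | zero => intro s; rfl
  | succ n ih =>
    intro s
    rw [List.range'_succ, List.flatMap_cons, List.length_append, ih (s+1)]
    simp
    omega

theorem pair_flatMap_getElem? {α : Type} (g : Nat → α) :
    ∀ (n s i : Nat), i < 2 * n →
      ((List.range' s n).flatMap (fun r => [g r, g r]))[i]? = some (g (s + i / 2)) := by
  intro n
  induction n with
  | zero => intro s i hi; omega
  | succ n ih =>
    intro s i hi
    rw [List.range'_succ, List.flatMap_cons]
    show (g s :: g s :: (List.range' (s+1) n).flatMap (fun r => [g r, g r]))[i]? = _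
    match i with
    | 0 => simp
    | 1 => simp
    | (i+2) =>
      rw [List.getElem?_cons_succ, List.getElem?_cons_succ, ih (s+1) i (by omega)]
      have : s + 1 + i / 2 = s + (i + 2) / 2 := by omega
      rw [this]

theorem matrix_ext (m1 m2 : List (List Int))
    (h2 : ∀ i : Nat, m1[i]?.map List.length = m2[i]?.map List.length)
    (h3 : ∀ i j : Nat, pvAt m1 i j = pvAt m2 i j) : m1 = m2 := by
  apply List.ext_getElem?
  intro i
  cases h1a : m1[i]? with
  | none =>
    have := h2 i
    rw [h1a] at this
    cases h2a : m2[i]? with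
    | none => rfl
    | some r2 => rw [h2a] at this; simp at this
  | some r1 =>
    have hl := h2 i
    rw [h1a] at hl
    cases h2a : m2[i]? with
    | none => rw [h2a] at hl; simp at hl
    | some r2 =>
      rw [h2a] at hl
      simp only [Option.map_some, Option.some.injEq] at hl
      congr 1
      apply List.ext_getElem?
      intro j
      have hv := h3 i j
      simp only [pvAt, h1a, h2a, Option.getD_some] at hv
      cases hj1 : r1[j]? with
      | none =>
        have : r1.length ≤ j := List.getElem?_eq_none_iff.1 hj1
        symm
        rw [List.getElem?_eq_none_iff]
        omega
      | some x =>
        have hjlt : j < r1.length := by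
          cases Nat.lt_or_ge j r1.length with
          | inl h => exact h
          | inr h => rw [List.getElem?_eq_none_iff.2 h] at hj1; cases hj1
        cases hj2 : r2[j]? with
        | none =>
          have : r2.length ≤ j := List.getElem?_eq_none_iff.1 hj2
          omega
        | some y =>
          rw [hj1, hj2] at hv
          simp only [Option.getD_some] at hv
          rw [hv]

theorem pvAt_replicate (hh ww : Nat) (i j : Nat) :
    pvAt (List.replicate hh (List.replicate ww (0:Int))) i j = 0 := by
  simp only [pvAt, List.getElem?_replicate]
  split_ifs <;> simp [List.getElem?_replicate] <;> split_ifs <;> rfl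

theorem pv_cells_nil_iff (grid : List (List Int)) :
    pvCells grid = [] ↔ pvNzRows grid = [] := by
  constructor
  · intro h
    rw [List.eq_nil_iff_forall_not_mem]
    intro r hr
    rw [pvNzRows, List.mem_filter, List.mem_range] at hr
    have : r ∈ (pvCells grid).map Prod.fst := (mem_fst grid r).2 ⟨hr.1, hr.2⟩
    rw [h] at this
    simp at this
  · intro h
    rw [List.eq_nil_iff_forall_not_mem]
    intro rc hrc
    have hm : rc.1 ∈ (pvCells grid).map Prod.fst := List.mem_map_of_mem hrc
    rw [mem_fst] at hm
    have : rc.1 ∈ pvNzRows grid := by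
      rw [pvNzRows, List.mem_filter, List.mem_range]
      exact ⟨hm.1, hm.2⟩
    rw [h] at this
    simp at this

theorem head_filter_least' (p : Nat → Bool) (n a : Nat) (t : List Nat)
    (h : (List.range n).filter p = a :: t) (b : Nat) (hb : b < n) (hpb : p b = true) : a ≤ b := by
  rw [List.range_eq_range'] at h
  exact head_filter_least p n 0 a t h b (List.mem_range'_1.2 ⟨Nat.zero_le _, by omega⟩) hpb

theorem getLast_filter_greatest' (p : Nat → Bool) (n b : Nat) (hb : b < n) (hpb : p b = true) :
    b ≤ ((List.range n).filter p).getLast?.getD 0 := by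
  rw [List.range_eq_range']
  exact getLast_filter_greatest p n 0 b (List.mem_range'_1.2 ⟨Nat.zero_le _, by omega⟩) hpb

theorem pv_main (grid : List (List Int)) : solve_f25fbde4 grid = solve_f25fbde4_alt grid := by
  by_cases hemp : pvCells grid = []
  · have hnzn : pvNzRows grid = [] := (pv_cells_nil_iff grid).1 hemp
    simp [solve_f25fbde4, solve_f25fbde4_alt, hemp, hnzn]
  · have hnz : pvNzRows grid ≠ [] := fun h => hemp ((pv_cells_nil_iff grid).2 h)
    have hfstne : (pvCells grid).map Prod.fst ≠ [] := by
      simpa using hemp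
    have hsndne : (pvCells grid).map Prod.snd ≠ [] := by
      simpa using hemp
    obtain ⟨minr, hminr⟩ : ∃ m, PySem.List.min? ((pvCells grid).map Prod.fst) (fun x => x) = some m := by
      cases hmm : PySem.List.min? ((pvCells grid).map Prod.fst) (fun x => x) with
      | none => exact absurd ((PySem.List.min?_eq_none_iff _ _).1 hmm) hfstne
      | some m => exact ⟨m, rfl⟩
    obtain ⟨maxr, hmaxr⟩ : ∃ m, PySem.List.max? ((pvCells grid).map Prod.fst) (fun x => x) = some m := by
      cases hmm : PySem.List.max? ((pvCells grid).map Prod.fst) (fun x => x) with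
      | none => exact absurd ((PySem.List.max?_eq_none_iff _ _).1 hmm) hfstne
      | some m => exact ⟨m, rfl⟩
    obtain ⟨minc, hminc⟩ : ∃ m, PySem.List.min? ((pvCells grid).map Prod.snd) (fun x => x) = some m := by
      cases hmm : PySem.List.min? ((pvCells grid).map Prod.snd) (fun x => x) with
      | none => exact absurd ((PySem.List.min?_eq_none_iff _ _).1 hmm) hsndne
      | some m => exact ⟨m, rfl⟩
    obtain ⟨maxc, hmaxc⟩ : ∃ m, PySem.List.max? ((pvCells grid).map Prod.snd) (fun x => x) = some m := by
      cases hmm : PySem.List.max? ((pvCells grid).map Prod.snd) (fun x => x) with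
      | none => exact absurd ((PySem.List.max?_eq_none_iff _ _).1 hmm) hsndne
      | some m => exact ⟨m, rfl⟩
    have hminr_mem := PySem.List.min?_mem hminr
    have hminr_min : ∀ y ∈ (pvCells grid).map Prod.fst, minr ≤ y := PySem.List.min?_isMin hminr
    have hmaxr_mem := PySem.List.max?_mem hmaxr
    have hmaxr_max : ∀ y ∈ (pvCells grid).map Prod.fst, y ≤ maxr := PySem.List.max?_isMax hmaxr
    have hminc_mem := PySem.List.min?_mem hminc
    have hminc_min : ∀ y ∈ (pvCells grid).map Prod.snd, minc ≤ y := PySem.List.min?_isMin hminc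
    have hmaxc_mem := PySem.List.max?_mem hmaxc
    have hmaxc_max : ∀ y ∈ (pvCells grid).map Prod.snd, y ≤ maxc := PySem.List.max?_isMax hmaxc
    have hminr_row := (mem_fst grid minr).1 hminr_mem
    have hmaxr_row := (mem_fst grid maxr).1 hmaxr_mem
    have hminc_col := (mem_snd grid minc).1 hminc_mem
    have hmaxc_col := (mem_snd grid maxc).1 hmaxc_mem
    have hmr : minr ≤ maxr := hmaxr_max minr hminr_mem
    have hmc : minc ≤ maxc := hmaxc_max minc hminc_mem
    -- B's head/last of the filtered row list equal A's min/max
    obtain ⟨a0, t0, hat⟩ := List.exists_cons_of_ne_nil hnz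
    have hminrB : (pvNzRows grid).head?.getD 0 = minr := by
      rw [hat]
      simp only [List.head?_cons, Option.getD_some]
      have ha_mem : a0 ∈ pvNzRows grid := by rw [hat]; exact List.mem_cons_self
      rw [pvNzRows, List.mem_filter, List.mem_range] at ha_mem
      have h1 : minr ≤ a0 := hminr_min a0 ((mem_fst grid a0).2 ⟨ha_mem.1, ha_mem.2⟩)
      have h2 : a0 ≤ minr := by
        apply head_filter_least' (pvRowNZ grid) grid.length a0 t0 _ minr hminr_row.1 hminr_row.2
        rw [← pvNzRows]; exact hat
      omega
    have hmaxrB : (pvNzRows grid).getLast?.getD 0 = maxr := by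
      have hmem := pv_getLast_getD_mem _ hnz
      rw [pvNzRows, List.mem_filter, List.mem_range] at hmem
      have h1 : (pvNzRows grid).getLast?.getD 0 ≤ maxr :=
        hmaxr_max _ ((mem_fst grid _).2 ⟨hmem.1, hmem.2⟩)
      have h2 : maxr ≤ (pvNzRows grid).getLast?.getD 0 := by
        rw [pvNzRows]
        exact getLast_filter_greatest' (pvRowNZ grid) grid.length maxr hmaxr_row.1 hmaxr_row.2
      omega
    have hnzc : pvNzCols grid ≠ [] := by
      apply List.ne_nil_of_mem (a := minc)
      rw [pvNzCols, List.mem_filter, List.mem_range]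
      exact ⟨hminc_col.1, hminc_col.2⟩
    obtain ⟨a1, t1, hat1⟩ := List.exists_cons_of_ne_nil hnzc
    have hmincB : (pvNzCols grid).head?.getD 0 = minc := by
      rw [hat1]
      simp only [List.head?_cons, Option.getD_some]
      have ha_mem : a1 ∈ pvNzCols grid := by rw [hat1]; exact List.mem_cons_self
      rw [pvNzCols, List.mem_filter, List.mem_range] at ha_mem
      have h1 : minc ≤ a1 := hminc_min a1 ((mem_snd grid a1).2 ⟨ha_mem.1, ha_mem.2⟩)
      have h2 : a1 ≤ minc := by
        apply head_filter_least' (pvColNZ grid) (grid.headD []).length a1 t1 _ minc hminc_col.1 hminc_col.2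
        rw [← pvNzCols]; exact hat1
      omega
    have hmaxcB : (pvNzCols grid).getLast?.getD 0 = maxc := by
      have hmem := pv_getLast_getD_mem _ hnzc
      rw [pvNzCols, List.mem_filter, List.mem_range] at hmem
      have h1 : (pvNzCols grid).getLast?.getD 0 ≤ maxc :=
        hmaxc_max _ ((mem_snd grid _).2 ⟨hmem.1, hmem.2⟩)
      have h2 : maxc ≤ (pvNzCols grid).getLast?.getD 0 := by
        rw [pvNzCols]
        exact getLast_filter_greatest' (pvColNZ grid) (grid.headD []).length maxc hmaxc_col.1 hmaxc_col.2
      omega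
    -- reduce both sides
    have hempA : (pvCells grid).isEmpty = false := by
      simp [List.isEmpty_iff, hemp]
    have hempB : (pvNzRows grid).isEmpty = false := by
      simp [List.isEmpty_iff, hnz]
    simp only [solve_f25fbde4, solve_f25fbde4_alt, hempA, hempB, Bool.false_eq_true,
      if_false, hminr, hmaxr, hminc, hmaxc, hminrB, hmaxrB, hmincB, hmaxcB, Option.getD_some]
    have hrowflat : ∀ r : Nat, pvRow grid minc maxc r =
        (List.range' minc (maxc + 1 - minc)).flatMap (fun c => [pvGet grid r c, pvGet grid r c]) := by
      intro r
      rw [pvRow, PySem.List.foldl_append_eq_flatMap, List.nil_append]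
    rw [PySem.List.foldl_append_eq_flatMap, List.nil_append]
    simp only [hrowflat]
    -- matrix extensionality between the scatter fold and the flatMap construction
    have hrows0 : pvRowsLen (List.replicate ((maxr - minr + 1) * 2) (List.replicate ((maxc - minc + 1) * 2) (0:Int))) ((maxc - minc + 1) * 2) := by
      intro k row hk
      rw [List.getElem?_replicate] at hk
      split_ifs at hk
      · cases hk; simp
    have hcellp : ∀ p ∈ pvCells grid, minr ≤ p.1 ∧ minc ≤ p.2 ∧
        (p.1 - minr) * 2 + 1 < (List.replicate ((maxr - minr + 1) * 2) (List.replicate ((maxc - minc + 1) * 2) (0:Int))).length ∧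
        (p.2 - minc) * 2 + 1 < (maxc - minc + 1) * 2 := by
      intro p hp
      have h1 := hminr_min p.1 (List.mem_map_of_mem hp)
      have h2 := hmaxr_max p.1 (List.mem_map_of_mem hp)
      have h3 := hminc_min p.2 (List.mem_map_of_mem hp)
      have h4 := hmaxc_max p.2 (List.mem_map_of_mem hp)
      rw [List.length_replicate]
      omega
    have hmaxrR : maxr < grid.length := hmaxr_row.1
    have hmaxcC : maxc < (grid.headD []).length := hmaxc_col.1
    have hfoldlen : ((pvCells grid).foldl (pvScatter grid minr minc)
        (List.replicate ((maxr - minr + 1) * 2) (List.replicate ((maxc - minc + 1) * 2) (0:Int)))).length =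
        (maxr - minr + 1) * 2 := by
      rw [fold_scatter_length, List.length_replicate]
    apply matrix_ext
    · -- row lengths agree, index-wise
      intro i
      by_cases hi : i < (maxr - minr + 1) * 2
      · cases hri : ((pvCells grid).foldl (pvScatter grid minr minc)
            (List.replicate ((maxr - minr + 1) * 2) (List.replicate ((maxc - minc + 1) * 2) (0:Int))))[i]? with
        | none =>
          have := List.getElem?_eq_none_iff.1 hri
          rw [hfoldlen] at this
          omega
        | some row =>
          have hlen := fold_scatter_rowsLen grid minr minc ((maxc - minc + 1) * 2) (pvCells grid) _ hrows0 i row hri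
          rw [pair_flatMap_getElem? (fun r => (List.range' minc (maxc + 1 - minc)).flatMap
              (fun c => [pvGet grid r c, pvGet grid r c])) (maxr + 1 - minr) minr i (by omega)]
          simp only [Option.map_some]
          rw [hlen, pair_flatMap_length]
          congr 1
          omega
      · have h1 : ((pvCells grid).foldl (pvScatter grid minr minc)
            (List.replicate ((maxr - minr + 1) * 2) (List.replicate ((maxc - minc + 1) * 2) (0:Int))))[i]? = none := by
          rw [List.getElem?_eq_none_iff, hfoldlen]; omega
        have h2 : (((List.range' minr (maxr + 1 - minr)).flatMap fun r =>
            [(List.range' minc (maxc + 1 - minc)).flatMap fun c => [pvGet grid r c, pvGet grid r c],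
             (List.range' minc (maxc + 1 - minc)).flatMap fun c => [pvGet grid r c, pvGet grid r c]]))[i]? = none := by
          rw [List.getElem?_eq_none_iff, pair_flatMap_length]; omega
        rw [h1, h2]
    · -- entries agree
      intro i j
      by_cases hi : i < (maxr - minr + 1) * 2
      · rw [fold_scatter_at grid minr minc ((maxc - minc + 1) * 2) (pvCells grid) _ hcellp hrows0 i j]
        by_cases hj : j < (maxc - minc + 1) * 2
        · have hRHS : pvAt ((List.range' minr (maxr + 1 - minr)).flatMap fun r =>
              [(List.range' minc (maxc + 1 - minc)).flatMap fun c => [pvGet grid r c, pvGet grid r c],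
               (List.range' minc (maxc + 1 - minc)).flatMap fun c => [pvGet grid r c, pvGet grid r c]]) i j =
              pvGet grid (minr + i / 2) (minc + j / 2) := by
            have houter := pair_flatMap_getElem? (fun r => (List.range' minc (maxc + 1 - minc)).flatMap
                (fun c => [pvGet grid r c, pvGet grid r c])) (maxr + 1 - minr) minr i (by omega)
            have hinner := pair_flatMap_getElem? (fun c => pvGet grid (minr + i / 2) c)
                (maxc + 1 - minc) minc j (by omega)
            simp only [pvAt, houter, Option.getD_some, hinner]
          rw [hRHS]
          by_cases hz : pvGet grid (minr + i / 2) (minc + j / 2) = 0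
          · have hnm : (minr + i / 2, minc + j / 2) ∉ pvCells grid := by
              intro hmem
              exact ((mem_pvCells grid _ _).1 hmem).2.2 hz
            rw [if_neg hnm, pvAt_replicate, hz]
          · have hmem : (minr + i / 2, minc + j / 2) ∈ pvCells grid :=
              (mem_pvCells grid _ _).2 ⟨by omega, by omega, hz⟩
            rw [if_pos hmem]
        · -- j out of range: both sides are 0
          have hnm : (minr + i / 2, minc + j / 2) ∉ pvCells grid := by
            intro hmem
            have := hmaxc_max _ (List.mem_map_of_mem hmem)
            simp only at this
            omega
          rw [if_neg hnm, pvAt_replicate]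
          have houter : ((List.range' minr (maxr + 1 - minr)).flatMap fun r =>
              [(List.range' minc (maxc + 1 - minc)).flatMap fun c => [pvGet grid r c, pvGet grid r c],
               (List.range' minc (maxc + 1 - minc)).flatMap fun c => [pvGet grid r c, pvGet grid r c]])[i]? =
              some ((List.range' minc (maxc + 1 - minc)).flatMap fun c =>
                [pvGet grid (minr + i / 2) c, pvGet grid (minr + i / 2) c]) :=
            pair_flatMap_getElem? (fun r => (List.range' minc (maxc + 1 - minc)).flatMap
                (fun c => [pvGet grid r c, pvGet grid r c])) (maxr + 1 - minr) minr i (by omega)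
          have hinner : ((List.range' minc (maxc + 1 - minc)).flatMap fun c =>
              [pvGet grid (minr + i / 2) c, pvGet grid (minr + i / 2) c])[j]? = none := by
            rw [List.getElem?_eq_none_iff, pair_flatMap_length]; omega
          simp only [pvAt, houter, Option.getD_some, hinner, Option.getD_none]
      · have h1 : ((pvCells grid).foldl (pvScatter grid minr minc)
            (List.replicate ((maxr - minr + 1) * 2) (List.replicate ((maxc - minc + 1) * 2) (0:Int))))[i]? = none := by
          rw [List.getElem?_eq_none_iff, hfoldlen]; omega
        have h2 : (((List.range' minr (maxr + 1 - minr)).flatMap fun r =>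
            [(List.range' minc (maxc + 1 - minc)).flatMap fun c => [pvGet grid r c, pvGet grid r c],
             (List.range' minc (maxc + 1 - minc)).flatMap fun c => [pvGet grid r c, pvGet grid r c]]))[i]? = none := by
          rw [List.getElem?_eq_none_iff, pair_flatMap_length]; omega
        simp only [pvAt, h1, h2]

-- ===== VERDICT (by name: the statement is the Claim_ definition above) =====
theorem solve_f25fbde4_spec : Claim_equal_solve_f25fbde4 := by
  intro grid _ _
  unfold Spec_solve_f25fbde4
  exact pv_main grid
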